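-- pv_equiv track=rewrite | github.com/eranhad/python_exercises | spell_check_Solution.py | spell_check
-- ===== SOURCE A (Python) =====
-- def spell_check(word, input_list):
--     temp_list = []
--
--     # if the word is in the input list then return True
--     if word in input_list:
--         return True
--
--     # if word not in inlupt list and doesn't have a dot in it then return False
--     elif word not in input_list and '.' not in word:
--         return False
--
--     # word has a dot in it
--     else:
--         for w in input_list:
--             # match the words with the same length
--             if len(w) == len(word):
--                 temp_list.append(w)
--
--         for x in temp_list:
--             cnt = 0
--
--             # check if each letter in the word matches the letter in the word from the input list
--             for i in range(len(word)):
--                 if (x[i] == word[i]) or (word[i]=='.'):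
--                     cnt += 1
--                 else:
--                     break
--
--             if cnt == len(word):
--                 return True
--
--         return False
-- ===== SOURCE B (Python) =====
-- def spell_check(word, input_list):
--     if word in input_list:
--         return True
--     if '.' not in word:
--         return False
--     # column-wise candidate narrowing: start from the same-length words and,
--     # position by position, keep only those whose character agrees with word
--     # (a '.' constrains nothing); succeed iff a candidate survives every column.
--     candidates = [w for w in input_list if len(w) == len(word)]
--     for i, c in enumerate(word):
--         if c != '.':
--             candidates = [w for w in candidates if w[i] == c]
--         if not candidates:
--             return False
--     return True
-- ===== Notes on version B (the rewrite author's own statement) =====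
-- stated objective: alternative
-- what changed: Instead of A's per-candidate inner character loop with a counter, B narrows a candidate set column by column: it keeps the equal-length words and, for each position of the word, filters the surviving candidates by that one character ('.' filters nothing), answering True iff some candidate survives all columns.
import Mathlib
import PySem

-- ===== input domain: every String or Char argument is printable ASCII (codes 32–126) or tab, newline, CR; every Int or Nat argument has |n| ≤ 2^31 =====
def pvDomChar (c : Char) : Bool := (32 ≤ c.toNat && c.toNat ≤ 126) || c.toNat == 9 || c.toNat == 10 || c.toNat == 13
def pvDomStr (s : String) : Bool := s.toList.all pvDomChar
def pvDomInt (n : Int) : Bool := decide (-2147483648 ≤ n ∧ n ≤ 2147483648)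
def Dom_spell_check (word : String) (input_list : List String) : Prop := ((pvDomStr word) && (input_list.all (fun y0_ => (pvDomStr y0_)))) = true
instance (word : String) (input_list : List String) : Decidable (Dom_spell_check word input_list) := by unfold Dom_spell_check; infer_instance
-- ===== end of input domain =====

-- B replaces A's per-candidate counter loop by column-wise narrowing: keep the equal-length
-- words and filter the surviving candidates one word-position at a time ('.' filters nothing);
-- alternative decomposition, same cost.

-- ===== PORT A =====
-- A's inner `for i in range(len(word))` counter loop with break; `x[i]`/`word[i]` indexing is
-- always in range where A calls it (x comes from temp_list, so len(x) = len(word)).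
def spell_check_aCnt (x w : List Char) (i cnt : Nat) : Nat :=
  if i < w.length then
    if x.getD i ' ' = w.getD i ' ' ∨ w.getD i ' ' = '.' then
      spell_check_aCnt x w (i + 1) (cnt + 1)
    else cnt
  else cnt
termination_by w.length - i

-- A's `for x in temp_list` loop with its early `return True`
def spell_check_aLoop (word : List Char) : List (List Char) → Bool
  | [] => false
  | x :: rest =>
    if spell_check_aCnt x word 0 0 = word.length then true
    else spell_check_aLoop word rest

def spell_check (word : String) (input_list : List String) : Bool :=
  if input_list.contains word then true
  else if ¬ input_list.contains word = true ∧ ¬ word.toList.contains '.' = true then false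
  else
    let temp_list := input_list.foldl
      (fun acc w => if w.toList.length = word.toList.length then acc ++ [w] else acc) []
    spell_check_aLoop word.toList (temp_list.map String.toList)

-- ===== PORT B =====
-- B's `for i, c in enumerate(word)` loop narrowing the candidate set; `w[i]` is in range
-- because every candidate has len(w) = len(word) and 0 ≤ i < len(word).
def spell_check_bFilter (cands : List (List Char)) : List (Int × Char) → Bool
  | [] => true
  | (i, c) :: rest =>
    let cands' := if c ≠ '.' then cands.filter (fun w => w.getD i.toNat ' ' == c) else cands
    if cands'.isEmpty then false else spell_check_bFilter cands' rest

def spell_check_alt (word : String) (input_list : List String) : Bool :=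
  if input_list.contains word then true
  else if ¬ word.toList.contains '.' = true then false
  else
    let candidates :=
      (input_list.filter (fun w => decide (w.toList.length = word.toList.length))).map
        String.toList
    spell_check_bFilter candidates (PySem.List.enumerate word.toList 0)

-- ===== PRECONDITION & SPEC =====
def Spec_spell_check (word : String) (input_list : List String) (out : Bool) : Prop := out = spell_check_alt word input_list
instance (word : String) (input_list : List String) (out : Bool) : Decidable (Spec_spell_check word input_list out) := by unfold Spec_spell_check; infer_instance

-- ===== CLAIM (what is proved, stated in full; the proofs are below) =====
def Claim_equal_spell_check : Prop := ∀ (word : String) (input_list : List String), Dom_spell_check word input_list → Spec_spell_check word input_list (spell_check word input_list)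

-- ===== LEMMAS AND PROOFS =====

-- length of the matching wildcard prefix (counts what A's inner loop counts)
def pvPrefLen : List Char → List Char → Nat
  | a :: as, b :: bs => if b = a ∨ a = '.' then pvPrefLen as bs + 1 else 0
  | _, _ => 0

theorem aCnt_eq_prefLen (x w : List Char) (hx : x.length = w.length) :
    ∀ i cnt, spell_check_aCnt x w i cnt = cnt + pvPrefLen (w.drop i) (x.drop i) := by
  intro i
  induction h : w.length - i using Nat.strong_induction_on generalizing i with
  | _ n ih =>
    intro cnt
    unfold spell_check_aCnt
    by_cases hi : i < w.length
    · have hix : i < x.length := by omega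
      have hw : w.drop i = w[i] :: w.drop (i + 1) := List.drop_eq_getElem_cons hi
      have hxd : x.drop i = x[i] :: x.drop (i + 1) := List.drop_eq_getElem_cons hix
      have hgw : w.getD i ' ' = w[i] := by simp [List.getD_eq_getElem?_getD, hi]
      have hgx : x.getD i ' ' = x[i] := by simp [List.getD_eq_getElem?_getD, hix]
      rw [if_pos hi, hw, hxd]
      by_cases hc : x.getD i ' ' = w.getD i ' ' ∨ w.getD i ' ' = '.'
      · rw [if_pos hc, ih (w.length - (i + 1)) (by omega) (i + 1) rfl cnt.succ]
        have hc' : x[i] = w[i] ∨ w[i] = '.' := by rw [← hgw, ← hgx]; exact hc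
        simp only [pvPrefLen, if_pos hc']
        omega
      · rw [if_neg hc]
        have hc' : ¬ (x[i] = w[i] ∨ w[i] = '.') := by rw [← hgw, ← hgx]; exact hc
        simp [pvPrefLen, hc']
    · rw [if_neg hi]
      have : w.drop i = [] := by
        apply List.drop_eq_nil_of_le; omega
      simp [this, pvPrefLen]

theorem prefLen_eq_length_iff (w x : List Char) (hx : x.length = w.length) :
    (pvPrefLen w x = w.length) ↔
      ((w.zip x).all fun p => p.1 == '.' || p.1 == p.2) = true := by
  induction w generalizing x with
  | nil => cases x <;> simp [pvPrefLen] at hx ⊢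
  | cons a as ihw =>
    cases x with
    | nil => simp at hx
    | cons b bs =>
      simp only [List.length_cons, Nat.add_right_cancel_iff] at hx
      by_cases hc : b = a ∨ a = '.'
      · have hpl : pvPrefLen as bs ≤ as.length := by
          clear hc ihw hx
          induction as generalizing bs with
          | nil => simp [pvPrefLen]
          | cons c cs ihc =>
            cases bs with
            | nil => simp [pvPrefLen]
            | cons d ds =>
              by_cases hd : d = c ∨ c = '.'
              · simpa [pvPrefLen, hd] using ihc ds
              · simp [pvPrefLen, hd]
        have hc' : (a == '.' || a == b) = true := by
          rcases hc with h | h <;> simp [h]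
        simp only [pvPrefLen, if_pos hc, List.zip_cons_cons, List.all_cons, hc',
          Bool.true_and, List.length_cons]
        rw [← ihw bs hx]
        omega
      · have hc' : (a == '.' || a == b) = false := by
          rcases (not_or.mp hc) with ⟨h1, h2⟩
          simp [Ne.symm h1, h2]
        simp [pvPrefLen, hc, hc', List.zip_cons_cons]

theorem aLoop_eq_any (w : List Char) (l : List (List Char)) :
    spell_check_aLoop w l = l.any fun x => decide (spell_check_aCnt x w 0 0 = w.length) := by
  induction l with
  | nil => rfl
  | cons x rest ih =>
    by_cases h : spell_check_aCnt x w 0 0 = w.length <;>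
      simp [spell_check_aLoop, h, ih]

-- per-(index, char) constraint that B's column filter imposes
def pvCol (w : List Char) (p : Int × Char) : Bool :=
  p.2 == '.' || w.getD p.1.toNat ' ' == p.2

theorem any_congr_mem {α : Type} (l : List α) (f g : α → Bool)
    (h : ∀ x ∈ l, f x = g x) : l.any f = l.any g := by
  induction l with
  | nil => rfl
  | cons x rest ih =>
    simp only [List.any_cons, h x (List.mem_cons_self), ih fun y hy => h y (List.mem_cons_of_mem _ hy)]

theorem bFilter_eq_any (pairs : List (Int × Char)) (hne : pairs ≠ []) (cands : List (List Char)) :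
    spell_check_bFilter cands pairs = cands.any fun w => pairs.all (pvCol w) := by
  induction pairs generalizing cands with
  | nil => exact absurd rfl hne
  | cons p rest ih =>
    obtain ⟨i, c⟩ := p
    show (let cands' := if c ≠ '.' then cands.filter (fun w => w.getD i.toNat ' ' == c) else cands
          if cands'.isEmpty then false else spell_check_bFilter cands' rest) = _
    have hstep :
        ((if c ≠ '.' then cands.filter (fun w => w.getD i.toNat ' ' == c) else cands).any
            fun w => rest.all (pvCol w)) =
          cands.any fun w => pvCol w (i, c) && rest.all (pvCol w) := by
      by_cases hc : c = '.'
      · simp [hc, pvCol]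
      · have hcf : (c == '.') = false := by simp [hc]
        rw [if_pos hc, List.any_filter]
        refine any_congr_mem _ _ _ fun w _ => ?_
        simp [pvCol, hcf]
    simp only [List.all_cons]
    rw [← hstep]
    cases hfe : (if c ≠ '.' then cands.filter (fun w => w.getD i.toNat ' ' == c) else cands) with
    | nil => simp [spell_check_bFilter, hfe]
    | cons y ys =>
      simp only [List.isEmpty_cons, if_neg Bool.false_ne_true]
      cases hr : rest with
      | nil => simp [spell_check_bFilter]
      | cons q qs =>
        rw [← hr, ih (by simp [hr])]

-- columns over `enumerate word s` say exactly "every position matches" (zip form)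
theorem enum_all_eq_zip (word : List Char) :
    ∀ (s : Int) (w : List Char), 0 ≤ s → w.length = s.toNat + word.length →
    ((PySem.List.enumerate word s).all (pvCol w)) =
      ((word.zip (w.drop s.toNat)).all fun p => p.1 == '.' || p.1 == p.2) := by
  induction word with
  | nil => intro s w _ _; simp [PySem.List.enumerate]
  | cons c cs ih =>
    intro s w hs hlen
    have hsl : s.toNat < w.length := by simp at hlen; omega
    have hdrop : w.drop s.toNat = w[s.toNat] :: w.drop (s.toNat + 1) :=
      List.drop_eq_getElem_cons hsl
    have hgd : w.getD s.toNat ' ' = w[s.toNat] := by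
      simp [List.getD_eq_getElem?_getD, hsl]
    have hs1 : (s + 1).toNat = s.toNat + 1 := by omega
    rw [PySem.List.enumerate_cons, List.all_cons, hdrop, List.zip_cons_cons, List.all_cons,
      ih (s + 1) w (by omega) (by simp at hlen ⊢; omega), hs1]
    congr 1
    simp only [pvCol]
    have : (w.getD s.toNat ' ' == c) = (c == w[s.toNat]) := by
      rw [hgd, Bool.beq_comm]
    rw [this]

-- ===== VERDICT (by name: the statement is the Claim_ definition above) =====
theorem spell_check_spec : Claim_equal_spell_check := by
  intro word input_list _
  unfold Spec_spell_check spell_check spell_check_alt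
  by_cases h1 : input_list.contains word = true
  · rw [if_pos h1, if_pos h1]
  · by_cases h2 : word.toList.contains '.' = true
    · rw [if_neg h1, if_neg h1, if_neg (fun h => h.2 h2), if_neg (fun h => h h2)]
      rw [PySem.List.foldl_append_ite_eq_filter, List.nil_append, aLoop_eq_any]
      have hwne : word.toList ≠ [] := by
        intro h; rw [h] at h2; simp at h2
      have hene : PySem.List.enumerate word.toList 0 ≠ [] := by
        cases h : word.toList with
        | nil => exact absurd h hwne
        | cons a as => simp [PySem.List.enumerate_cons]
      rw [bFilter_eq_any _ hene]
      refine any_congr_mem _ _ _ fun x hx => ?_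
      obtain ⟨s, hs, hxeq⟩ := List.mem_map.mp hx
      have hlen : x.length = word.toList.length := by
        have := (List.mem_filter.mp hs).2
        simp at this
        rw [← hxeq]; exact this
      have hc := aCnt_eq_prefLen x word.toList hlen 0 0
      simp only [List.drop_zero, Nat.zero_add] at hc
      have hz := enum_all_eq_zip word.toList 0 x (le_refl 0) (by simpa using hlen)
      simp only [Int.toNat_zero, List.drop_zero] at hz
      rw [hz, hc]
      by_cases hm : pvPrefLen word.toList x = word.toList.length
      · simp [hm, (prefLen_eq_length_iff _ _ hlen).mp hm]
      · have hzf : ((word.toList.zip x).all fun p => p.1 == '.' || p.1 == p.2) = false := by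
          cases h : ((word.toList.zip x).all fun p => p.1 == '.' || p.1 == p.2) with
          | true => exact absurd ((prefLen_eq_length_iff _ _ hlen).mpr h) hm
          | false => rfl
        simp [hzf]
        simpa using hm
    · rw [if_neg h1, if_neg h1, if_pos ⟨h1, h2⟩, if_pos h2]
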